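-- pv_equiv track=rewrite | github.com/hugorody/rga | RGAdb_beta2COORDINATES.py | findCOIL
-- ===== SOURCE A (Python) =====
-- def findCOIL(seq):
--     coords_tmp = []
--     coords = [] #list with start and end of coils
--     index = 0
--     for i in seq:
--         if i == "x":
--             passe = 1
--         else:
--             passe = 0
--             if coords_tmp != []:
--                 coords.append([coords_tmp[0],coords_tmp[-1]])
--                 coords_tmp = []
--         if passe == 1:
--             coords_tmp.append(index)
--         index += 1
--     return coords
-- ===== SOURCE B (Python) =====
-- def findCOIL(seq):
--     xs = [c == "x" for c in seq]
--     starts = [i for i, (prev, cur) in enumerate(zip([False] + xs, xs)) if cur and not prev]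
--     ends = [i for i, (cur, nxt) in enumerate(zip(xs, xs[1:])) if cur and not nxt]
--     return [[s, e] for s, e in zip(starts, ends)]
-- ===== Notes on version B (the rewrite author's own statement) =====
-- stated objective: alternative
-- what changed: Replaces A's stateful loop (coords_tmp accumulator + passe flag) by two declarative index comprehensions over neighbour-shifted zips (run starts and run ends) paired with zip, whose truncation drops the trailing run exactly as A's non-flushed accumulator does.
import Mathlib
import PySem

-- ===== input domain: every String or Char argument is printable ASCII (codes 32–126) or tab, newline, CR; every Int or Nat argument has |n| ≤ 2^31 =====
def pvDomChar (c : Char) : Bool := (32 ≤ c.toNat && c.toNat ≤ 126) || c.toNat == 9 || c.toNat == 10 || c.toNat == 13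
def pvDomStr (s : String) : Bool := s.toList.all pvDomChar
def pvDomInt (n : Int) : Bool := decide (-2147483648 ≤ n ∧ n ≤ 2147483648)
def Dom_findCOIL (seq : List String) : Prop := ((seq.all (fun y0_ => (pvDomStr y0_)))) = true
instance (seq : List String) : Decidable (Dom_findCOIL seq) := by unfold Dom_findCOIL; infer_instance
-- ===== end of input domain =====

-- B replaces A's running coords_tmp accumulator by two index comprehensions (run starts / run
-- ends via shifted zips) paired with zip; objective: alternative decomposition, not faster.

-- ===== PORT A =====
-- one loop iteration of A: state = (coords_tmp, coords, index)
def findCOIL_step (st : List Int × List (List Int) × Int) (i : String) :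
    List Int × List (List Int) × Int :=
  let (tmp, coords, index) := st
  let (passe, tmp, coords) :=
    if i == "x" then (1, tmp, coords)
    else (0,
          if tmp ≠ [] then ([] : List Int) else tmp,
          if tmp ≠ [] then
            coords ++ [[PySem.List.pyGetD tmp 0 0, PySem.List.pyGetD tmp (-1) 0]]
          else coords)
  let tmp := if passe == 1 then tmp ++ [index] else tmp
  (tmp, coords, index + 1)

def findCOIL (seq : List String) : List (List Int) :=
  (seq.foldl findCOIL_step ([], [], 0)).2.1

-- ===== PORT B =====
def findCOIL_alt (seq : List String) : List (List Int) :=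
  let xs := seq.map (fun c => c == "x")
  let starts := (PySem.List.enumerate ((false :: xs).zip xs) 0).filterMap
      (fun p => if p.2.2 && !p.2.1 then some p.1 else none)
  let ends := (PySem.List.enumerate (xs.zip (PySem.List.slice xs (some 1) none)) 0).filterMap
      (fun p => if p.2.1 && !p.2.2 then some p.1 else none)
  (starts.zip ends).map (fun p => [p.1, p.2])

-- ===== PRECONDITION & SPEC =====
def Spec_findCOIL (seq : List String) (out : List (List Int)) : Prop := out = findCOIL_alt seq
instance (seq : List String) (out : List (List Int)) : Decidable (Spec_findCOIL seq out) := by unfold Spec_findCOIL; infer_instance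

-- ===== CLAIM (what is proved, stated in full; the proofs are below) =====
def Claim_equal_findCOIL : Prop := ∀ (seq : List String), Dom_findCOIL seq → Spec_findCOIL seq (findCOIL seq)

-- ===== LEMMAS AND PROOFS =====

-- canonical run extractor: cur = start of the run in progress (none if not in a run), k = index
def pvRuns : Option Int → Int → List String → List (List Int)
  | _, _, [] => []
  | none, k, a :: t => if a == "x" then pvRuns (some k) (k + 1) t else pvRuns none (k + 1) t
  | some s, k, a :: t =>
      if a == "x" then pvRuns (some s) (k + 1) t else [s, k - 1] :: pvRuns none (k + 1) t

-- run starts of xs, given whether the element before was "x"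
def pvS : Bool → Int → List Bool → List Int
  | _, _, [] => []
  | p, k, b :: t => if b && !p then k :: pvS b (k + 1) t else pvS b (k + 1) t

-- run ends of xs (an end needs a following non-"x"), p = previous element was "x"
def pvE : Bool → Int → List Bool → List Int
  | _, _, [] => []
  | p, k, b :: t => if p && !b then (k - 1) :: pvE b (k + 1) t else pvE b (k + 1) t

-- invariant tying A's coords_tmp to (cur, k)
def pvInv (tmp : List Int) (k : Int) : Option Int → Prop
  | none => tmp = []
  | some s => tmp ≠ [] ∧ PySem.List.pyGetD tmp 0 0 = s ∧ PySem.List.pyGetD tmp (-1) 0 = k - 1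

theorem pvA_char (r : List String) : ∀ (tmp : List Int) (coords : List (List Int)) (k : Int)
    (cur : Option Int), pvInv tmp k cur →
    (r.foldl findCOIL_step (tmp, coords, k)).2.1 = coords ++ pvRuns cur k r := by
  induction r with
  | nil => intro tmp coords k cur _; simp [pvRuns]
  | cons a t ih =>
    intro tmp coords k cur hinv
    cases cur with
    | none =>
      simp only [pvInv] at hinv; subst hinv
      by_cases hx : a == "x"
      · simp only [List.foldl_cons, findCOIL_step, hx, if_pos]
        simp only [pvRuns, hx, if_pos]
        rw [show (if (1 == 1) = true then ([] : List Int) ++ [k] else []) = [k] by simp]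
        refine ih [k] coords (k + 1) (some k) ?_
        exact ⟨by simp, PySem.List.pyGetD_zero_cons k [] 0, by simp [pysem]⟩
      · have hx' : (a == "x") = false := by simpa using hx
        simp only [List.foldl_cons, findCOIL_step, hx', pvRuns]
        simp only [ne_eq, not_true_eq_false, if_false, Bool.false_eq_true, reduceIte]
        exact ih [] coords (k + 1) none rfl
    | some s =>
      obtain ⟨hne, h0, h1⟩ := hinv
      by_cases hx : a == "x"
      · simp only [List.foldl_cons, findCOIL_step, hx, if_pos]
        simp only [pvRuns, hx, if_pos]
        rw [show (if (1 == 1) = true then tmp ++ [k] else tmp) = tmp ++ [k] by simp]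
        refine ih (tmp ++ [k]) coords (k + 1) (some s) ?_
        refine ⟨by simp, ?_, ?_⟩
        · rw [PySem.List.pyGetD_zero] at h0 ⊢
          cases tmp with
          | nil => exact absurd rfl hne
          | cons x xs => simpa using h0
        · rw [PySem.List.pyGetD_neg_one_append_singleton]; ring
      · have hx' : (a == "x") = false := by simpa using hx
        simp only [List.foldl_cons, findCOIL_step, hx', pvRuns]
        simp only [ne_eq, hne, not_false_eq_true, if_true, Bool.false_eq_true, reduceIte]
        rw [show (if (0 == 1) = true then ([] : List Int) ++ [k] else []) = [] by simp]
        rw [ih [] (coords ++ [[PySem.List.pyGetD tmp 0 0, PySem.List.pyGetD tmp (-1) 0]])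
              (k + 1) none rfl, h0, h1]
        simp

-- B's starts comprehension computes pvS
theorem pvB_starts (xs : List Bool) : ∀ (p : Bool) (k : Int),
    (PySem.List.enumerate ((p :: xs).zip xs) k).filterMap
      (fun q => if q.2.2 && !q.2.1 then some q.1 else none) = pvS p k xs := by
  induction xs with
  | nil => intro p k; simp [pvS, PySem.List.enumerate]
  | cons b t ih =>
    intro p k
    simp only [List.zip_cons_cons, PySem.List.enumerate_cons, List.filterMap_cons, pvS]
    rw [ih b (k + 1)]
    by_cases h : b && !p <;> simp [h]

-- B's ends comprehension computes pvE (one step of lookahead: zip xs xs.tail)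
theorem pvB_ends_aux (t : List Bool) : ∀ (c : Bool) (k : Int),
    (PySem.List.enumerate ((c :: t).zip t) k).filterMap
      (fun q => if q.2.1 && !q.2.2 then some q.1 else none) = pvE c (k + 1) t := by
  induction t with
  | nil => intro c k; simp [pvE, PySem.List.enumerate]
  | cons d t' ih =>
    intro c k
    simp only [List.zip_cons_cons, PySem.List.enumerate_cons, List.filterMap_cons, pvE]
    rw [ih d (k + 1)]
    by_cases h : c && !d <;> simp [h, add_sub_cancel_right]

theorem pvB_ends (xs : List Bool) :
    (PySem.List.enumerate (xs.zip xs.tail) 0).filterMap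
      (fun q => if q.2.1 && !q.2.2 then some q.1 else none) = pvE false 0 xs := by
  cases xs with
  | nil => simp [pvE, PySem.List.enumerate]
  | cons b t =>
    show (PySem.List.enumerate ((b :: t).zip t) 0).filterMap _ = _
    rw [pvB_ends_aux t b 0]
    simp [pvE]

-- the zip of starts and ends is exactly the runs list (trailing run dropped by zip truncation)
theorem pvZip_runs (t : List String) : ∀ (k : Int),
    (((pvS false k (t.map (fun c => c == "x"))).zip
        (pvE false k (t.map (fun c => c == "x")))).map (fun p => [p.1, p.2])
      = pvRuns none k t)
    ∧ (∀ s : Int,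
      (((s :: pvS true k (t.map (fun c => c == "x"))).zip
          (pvE true k (t.map (fun c => c == "x")))).map (fun p => [p.1, p.2])
        = pvRuns (some s) k t)) := by
  induction t with
  | nil => intro k; simp [pvS, pvE, pvRuns]
  | cons a t ih =>
    intro k
    by_cases hx : a == "x"
    · constructor
      · simp only [List.map_cons, hx, pvS, pvE, pvRuns, if_pos]
        simp only [Bool.not_false, Bool.and_self, if_true, Bool.and_false, Bool.false_eq_true,
          reduceIte, if_pos]
        exact (ih (k + 1)).2 k
      · intro s
        simp only [List.map_cons, hx, pvS, pvE, pvRuns, if_pos]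
        simp only [Bool.not_true, Bool.and_false, Bool.false_eq_true, reduceIte]
        exact (ih (k + 1)).2 s
    · have hx' : (a == "x") = false := by simpa using hx
      constructor
      · simp only [List.map_cons, hx', pvS, pvE, pvRuns, Bool.false_eq_true, reduceIte,
          Bool.false_and, Bool.and_false]
        exact (ih (k + 1)).1
      · intro s
        simp only [List.map_cons, hx', pvS, pvE, pvRuns, Bool.false_eq_true, reduceIte,
          Bool.false_and, Bool.not_false, Bool.true_and, if_true, List.zip_cons_cons,
          List.map_cons]
        rw [(ih (k + 1)).1]

-- ===== VERDICT (by name: the statement is the Claim_ definition above) =====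
theorem findCOIL_spec : Claim_equal_findCOIL := by
  intro seq _
  show findCOIL seq = findCOIL_alt seq
  rw [findCOIL, findCOIL_alt, pvA_char seq [] [] 0 none rfl]
  simp only [List.nil_append]
  rw [PySem.List.slice_from_one, pvB_starts, pvB_ends]
  exact ((pvZip_runs seq 0).1).symm
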